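-- pv_equiv track=rewrite | github.com/fredrik/advent-of-code | 04/d04.py | get_matrix_diagonals
-- ===== SOURCE A (Python) =====
-- def get_matrix_diagonals(n):
--     """
--     Returns coordinates for all diagonals in an n x n matrix.
--     Returns list of lists, where each inner list contains (row, col) tuples for one diagonal.
--     """
--     # Main diagonal and above
--     diagonals = []
--     for k in range(n):
--         diagonal = []
--         for i in range(n - k):
--             diagonal.append((i, i + k))
--         diagonals.append(diagonal)
--
--     # Below main diagonal
--     for k in range(1, n):
--         diagonal = []
--         for i in range(n - k):
--             diagonal.append((i + k, i))
--         diagonals.append(diagonal)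
--
--     return diagonals
-- ===== SOURCE B (Python) =====
-- def get_matrix_diagonals(n):
--     """
--     Returns coordinates for all diagonals in an n x n matrix.
--     Returns list of lists, where each inner list contains (row, col) tuples for one diagonal.
--     """
--     buckets = {}
--     for i in range(n):
--         for j in range(n):
--             buckets.setdefault(j - i, []).append((i, j))
--     return [buckets.get(d, []) for d in range(n)] + [buckets.get(-d, []) for d in range(1, n)]
-- ===== Notes on version B (the rewrite author's own statement) =====
-- stated objective: alternative
-- what changed: Replaces A's four per-diagonal loops (two tuple formulas) by a single row-major pass over all cells that groups them into dict buckets keyed by j - i, then emits the buckets for offsets 0..n-1 followed by -1..-(n-1).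
import Mathlib
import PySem

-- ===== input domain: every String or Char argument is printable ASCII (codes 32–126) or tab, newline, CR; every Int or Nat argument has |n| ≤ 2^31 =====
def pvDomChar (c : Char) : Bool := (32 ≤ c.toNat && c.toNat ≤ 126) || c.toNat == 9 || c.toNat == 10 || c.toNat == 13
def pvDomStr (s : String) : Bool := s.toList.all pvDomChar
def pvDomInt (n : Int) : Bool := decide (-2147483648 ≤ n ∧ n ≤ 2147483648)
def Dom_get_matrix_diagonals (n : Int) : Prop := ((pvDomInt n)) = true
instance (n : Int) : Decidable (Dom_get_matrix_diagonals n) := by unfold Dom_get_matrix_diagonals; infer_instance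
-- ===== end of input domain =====

-- B replaces A's per-diagonal nested loops by one row-major pass grouping cells into
-- dict buckets keyed by j - i, then emits buckets for offsets 0..n-1 and -1..-(n-1)
-- (objective: alternative decomposition, same cost).

-- ===== PORT A =====
def get_matrix_diagonals (n : Int) : List (List (Int × Int)) :=
  -- main diagonal and above
  let diagonals := (PySem.List.pyRange 0 n 1).foldl (fun diagonals k =>
    diagonals ++ [(PySem.List.pyRange 0 (n - k) 1).foldl (fun diagonal i => diagonal ++ [(i, i + k)]) []]) []
  -- below main diagonal
  (PySem.List.pyRange 1 n 1).foldl (fun diagonals k =>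
    diagonals ++ [(PySem.List.pyRange 0 (n - k) 1).foldl (fun diagonal i => diagonal ++ [(i + k, i)]) []]) diagonals

-- ===== PORT B =====
def get_matrix_diagonals_alt (n : Int) : List (List (Int × Int)) :=
  let buckets : PySem.Dict Int (List (Int × Int)) :=
    (PySem.List.pyRange 0 n 1).foldl (fun buckets i =>
      (PySem.List.pyRange 0 n 1).foldl (fun buckets j =>
        -- buckets.setdefault(j - i, []).append((i, j))
        buckets.modify (j - i) [] (· ++ [(i, j)])) buckets) PySem.Dict.empty
  (PySem.List.pyRange 0 n 1).map (fun d => buckets.getD d []) ++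
  (PySem.List.pyRange 1 n 1).map (fun d => buckets.getD (-d) [])

-- ===== PRECONDITION & SPEC =====
def Spec_get_matrix_diagonals (n : Int) (out : List (List (Int × Int))) : Prop := out = get_matrix_diagonals_alt n
instance (n : Int) (out : List (List (Int × Int))) : Decidable (Spec_get_matrix_diagonals n out) := by unfold Spec_get_matrix_diagonals; infer_instance

-- ===== CLAIM (what is proved, stated in full; the proofs are below) =====
def Claim_equal_get_matrix_diagonals : Prop := ∀ (n : Int), Dom_get_matrix_diagonals n → Spec_get_matrix_diagonals n (get_matrix_diagonals n)

-- ===== LEMMAS AND PROOFS =====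

-- filtering a duplicate-free list for one value keeps at most that value
theorem pv_filter_beq {l : List Int} (h : l.Nodup) (x : Int) :
    l.filter (fun j => j == x) = if x ∈ l then [x] else [] := by
  induction l with
  | nil => simp
  | cons a t ih =>
    rw [List.filter_cons]
    rcases List.nodup_cons.mp h with ⟨ha, ht⟩
    by_cases hax : a = x
    · subst hax
      have h2 : t.filter (fun j => j == a) = [] :=
        List.filter_eq_nil_iff.mpr (fun j hj => by simp; rintro rfl; exact ha hj)
      simp [h2]
    · have h1 : (a == x) = false := by simp [hax]
      simp only [h1, Bool.false_eq_true, if_false, ih ht]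
      by_cases hx : x ∈ t
      · rw [if_pos hx, if_pos (List.mem_cons_of_mem _ hx)]
      · have hx2 : x ∉ a :: t := by
          intro hm
          rcases List.mem_cons.mp hm with hh | hh
          · exact hax hh.symm
          · exact hx hh
        rw [if_neg hx, if_neg hx2]

-- filtering a range below a bound truncates it
theorem pv_filter_lt (a b bnd : Int) :
    (PySem.List.pyRange a b 1).filter (fun j => decide (j < bnd)) =
      PySem.List.pyRange a (min b bnd) 1 := by
  by_cases hab : b ≤ a
  · rw [PySem.List.pyRange_one_eq_nil hab, PySem.List.pyRange_one_eq_nil (by omega)]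
    rfl
  · rw [PySem.List.pyRange_one_append a (max a (min b bnd)) b (by omega) (by omega),
        List.filter_append]
    have h2 : (PySem.List.pyRange a (max a (min b bnd)) 1).filter (fun j => decide (j < bnd))
        = PySem.List.pyRange a (max a (min b bnd)) 1 := by
      apply List.filter_eq_self.mpr
      intro j hj
      rw [PySem.List.mem_pyRange_one] at hj
      exact decide_eq_true (by omega)
    have h3 : (PySem.List.pyRange (max a (min b bnd)) b 1).filter (fun j => decide (j < bnd))
        = [] := by
      apply List.filter_eq_nil_iff.mpr
      intro j hj
      rw [PySem.List.mem_pyRange_one] at hj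
      simp only [decide_eq_true_eq]
      omega
    rw [h2, h3, List.append_nil]
    by_cases h4 : a ≤ min b bnd
    · congr 1; omega
    · rw [PySem.List.pyRange_one_eq_nil (by omega), PySem.List.pyRange_one_eq_nil (by omega)]

-- filtering a range above a bound truncates it from the left
theorem pv_filter_ge (a b bnd : Int) :
    (PySem.List.pyRange a b 1).filter (fun j => decide (bnd ≤ j)) =
      PySem.List.pyRange (max a bnd) b 1 := by
  by_cases hab : b ≤ a
  · rw [PySem.List.pyRange_one_eq_nil hab, PySem.List.pyRange_one_eq_nil (by omega)]
    rfl
  · rw [PySem.List.pyRange_one_append a (min b (max a bnd)) b (by omega) (by omega),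
        List.filter_append]
    have h2 : (PySem.List.pyRange a (min b (max a bnd)) 1).filter (fun j => decide (bnd ≤ j))
        = [] := by
      apply List.filter_eq_nil_iff.mpr
      intro j hj
      rw [PySem.List.mem_pyRange_one] at hj
      simp only [decide_eq_true_eq]
      omega
    have h3 : (PySem.List.pyRange (min b (max a bnd)) b 1).filter (fun j => decide (bnd ≤ j))
        = PySem.List.pyRange (min b (max a bnd)) b 1 := by
      apply List.filter_eq_self.mpr
      intro j hj
      rw [PySem.List.mem_pyRange_one] at hj
      exact decide_eq_true (by omega)
    rw [h2, h3, List.nil_append]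
    by_cases h4 : max a bnd ≤ b
    · congr 1; omega
    · rw [PySem.List.pyRange_one_eq_nil (by omega), PySem.List.pyRange_one_eq_nil (by omega)]

-- one inner row pass appends (i, j) to bucket c exactly for the column j = i + c
theorem pv_inner (i c : Int) : ∀ (cols : List Int) (d : PySem.Dict Int (List (Int × Int))),
    ((cols.foldl (fun d j => d.modify (j - i) [] (· ++ [(i, j)])) d).getD c [])
      = d.getD c [] ++ (cols.filter (fun j => j == i + c)).map (fun j => (i, j)) := by
  intro cols
  induction cols with
  | nil => intro d; simp
  | cons j t ih =>
    intro d
    rw [List.foldl_cons, ih, List.filter_cons, PySem.Dict.getD_modify]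
    by_cases hj : j = i + c
    · subst hj
      rw [if_pos (by ring), BEq.rfl, if_pos rfl]
      have h2 : i + c - i = c := by ring
      rw [h2]
      simp
    · rw [if_neg (by omega), if_neg (by simp [hj])]

-- the whole grouping pass: bucket c holds (i, i+c) for each admissible row i, in row order
theorem pv_outer (n c : Int) : ∀ (rows : List Int) (d : PySem.Dict Int (List (Int × Int))),
    ((rows.foldl (fun d i =>
        (PySem.List.pyRange 0 n 1).foldl (fun d j => d.modify (j - i) [] (· ++ [(i, j)])) d) d).getD c [])
      = d.getD c [] ++ (rows.filter (fun i => decide (0 ≤ i + c ∧ i + c < n))).map (fun i => (i, i + c)) := by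
  intro rows
  induction rows with
  | nil => intro d; simp
  | cons i rows ih =>
    intro d
    rw [List.foldl_cons, ih, pv_inner, List.filter_cons,
        pv_filter_beq (PySem.List.nodup_pyRange_one 0 n) (i + c)]
    by_cases h : 0 ≤ i + c ∧ i + c < n
    · rw [if_pos (PySem.List.mem_pyRange_one.mpr (by omega)), if_pos (decide_eq_true h)]
      simp
    · rw [if_neg (fun hm => h (by have := PySem.List.mem_pyRange_one.mp hm; omega)),
          if_neg (by simpa using h)]
      simp

-- shifting a range commutes with mapping
theorem pv_pyRange_shift_map {α : Type} (a b s : Int) (f : Int → α) :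
    (PySem.List.pyRange (a + s) (b + s) 1).map f =
      (PySem.List.pyRange a b 1).map (fun j => f (j + s)) := by
  rw [PySem.List.pyRange_one, PySem.List.pyRange_one, List.map_map, List.map_map]
  have hlen : (b + s - (a + s)).toNat = (b - a).toNat := by omega
  rw [hlen]
  apply List.map_congr_left
  intro t _
  simp only [Function.comp]
  congr 1
  ring

-- ===== VERDICT (by name: the statement is the Claim_ definition above) =====
theorem get_matrix_diagonals_spec : Claim_equal_get_matrix_diagonals := by
  intro n _
  unfold Spec_get_matrix_diagonals get_matrix_diagonals get_matrix_diagonals_alt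
  simp only [PySem.List.foldl_append_singleton_eq_map, List.nil_append]
  congr 1
  · -- offsets 0 .. n-1
    apply List.map_congr_left
    intro k hk
    rw [PySem.List.mem_pyRange_one] at hk
    rw [pv_outer]
    simp only [PySem.Dict.getD_empty, List.nil_append]
    have hc : (PySem.List.pyRange 0 n 1).filter (fun i => decide (0 ≤ i + k ∧ i + k < n))
        = (PySem.List.pyRange 0 n 1).filter (fun i => decide (i < n - k)) := by
      apply List.filter_congr
      intro i hi
      rw [PySem.List.mem_pyRange_one] at hi
      by_cases h : i < n - k
      · rw [decide_eq_true h, decide_eq_true (by omega)]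
      · rw [decide_eq_false (by omega), decide_eq_false (by omega)]
    rw [hc, pv_filter_lt]
    have : min n (n - k) = n - k := by omega
    rw [this]
  · -- offsets -1 .. -(n-1)
    apply List.map_congr_left
    intro k hk
    rw [PySem.List.mem_pyRange_one] at hk
    rw [pv_outer]
    simp only [PySem.Dict.getD_empty, List.nil_append]
    have hc : (PySem.List.pyRange 0 n 1).filter (fun i => decide (0 ≤ i + -k ∧ i + -k < n))
        = (PySem.List.pyRange 0 n 1).filter (fun i => decide (k ≤ i)) := by
      apply List.filter_congr
      intro i hi
      rw [PySem.List.mem_pyRange_one] at hi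
      by_cases h : k ≤ i
      · rw [decide_eq_true h, decide_eq_true (by omega)]
      · rw [decide_eq_false (by omega), decide_eq_false (by omega)]
    rw [hc, pv_filter_ge]
    have hmax : max (0 : Int) k = k := by omega
    rw [hmax]
    have hsplit : PySem.List.pyRange k n 1 = PySem.List.pyRange (0 + k) ((n - k) + k) 1 := by
      norm_num
    rw [hsplit, pv_pyRange_shift_map]
    apply List.map_congr_left
    intro i _
    congr 1
    ring
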